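-- pv_equiv track=rewrite | github.com/chris17453/ddbc | tools/languish/clean.py | clean_pattern
-- ===== SOURCE A (Python) =====
-- def clean_pattern(pattern):
--     pattern=pattern.strip()
--     found=None
--     new_pattern=""
--     dont_break_quoted_blocks=None
--     in_character_block=None
--     escaped=None
--     pattern= ''.join([i if ord(i) < 128 else ' ' for i in pattern])
--
--     for i in pattern:
--
--         if dont_break_quoted_blocks==True:
--                 if found:
--                     new_pattern+=i
--                     if i==found:
--                         found=None
--                     continue
--                 if i=="'":
--                     found="'"
--                 elif i=='"':
--                     found='"'
--                 if found:
--                     new_pattern+=i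
--                     continue
--
--         if escaped==None and  i=='\\':
--             escaped=True
--             new_pattern+=" "+i
--             continue
--
--         if escaped==True:
--             escaped=None
--             new_pattern+=i+" "
--             continue
--
--
--         if i=='[':
--             in_character_block=True
--         if in_character_block==True:
--             new_pattern+=" "+i+" "
--             if i==']':
--                 in_character_block=None
--             continue
--
--
--         if found == None:
--             if  i in ("|","(",")","[","]",",","-","^","+","*",".","?"):
--                 new_pattern+=" "+i+" "
--             else:
--                 new_pattern+=i
--         else:
--             new_pattern+=i
--     #print new_pattern
--     return new_pattern
-- ===== SOURCE B (Python) =====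
-- def clean_pattern(pattern):
--     s = ''.join(c if ord(c) < 128 else ' ' for c in pattern.strip())
--     specials = ("|", "(", ")", "[", "]", ",", "-", "^", "+", "*", ".", "?")
--     parts = []
--     rest = list(s)[::-1]        # worklist, top of stack = next character
--     in_block = False
--     while rest:
--         c = rest.pop()
--         if c == '\\':           # escape: consume the escaped char in the same step
--             parts.append(' \\')
--             if rest:
--                 parts.append(rest.pop() + ' ')
--         elif in_block:
--             parts.append(' ' + c + ' ')
--             if c == ']':
--                 in_block = False
--         elif c == '[':
--             parts.append(' [ ')
--             in_block = True
--         elif c in specials: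
--             parts.append(' ' + c + ' ')
--         else:
--             parts.append(c)
--     return ''.join(parts)
-- ===== Notes on version B (the rewrite author's own statement) =====
-- stated objective: simpler
-- what changed: Replaced A's per-character state machine (escaped flag carried across iterations, found/quoted-block variables with dead quoted-block logic, string +=) by a worklist loop that consumes multi-character tokens at once: an escape pops the escaped character in the same step, a single in_block flag tracks character classes, and the output is a join of parts.
import Mathlib
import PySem

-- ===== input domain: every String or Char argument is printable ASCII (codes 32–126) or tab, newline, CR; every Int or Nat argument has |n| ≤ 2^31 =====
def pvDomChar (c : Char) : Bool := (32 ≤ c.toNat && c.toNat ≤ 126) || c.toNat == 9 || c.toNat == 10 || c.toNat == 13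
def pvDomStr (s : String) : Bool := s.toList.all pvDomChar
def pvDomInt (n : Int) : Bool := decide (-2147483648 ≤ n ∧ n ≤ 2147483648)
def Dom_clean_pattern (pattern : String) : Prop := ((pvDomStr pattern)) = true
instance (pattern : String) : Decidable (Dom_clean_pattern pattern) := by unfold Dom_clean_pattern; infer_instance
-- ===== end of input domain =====

-- B replaces A's per-char flag machine (with its dead quoted-block logic) by an index-based
-- scan that consumes multi-char tokens (escape pairs, character-class blocks) at once: objective 'simpler'.

-- ===== PORT A =====
-- state: (found, dont_break_quoted_blocks, in_character_block, escaped, new_pattern)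
-- Python's None/True flags are Bool false/true; new_pattern is kept as a List Char.
def pvSpecialA (c : Char) : Bool :=
  c = '|' || c = '(' || c = ')' || c = '[' || c = ']' || c = ',' ||
  c = '-' || c = '^' || c = '+' || c = '*' || c = '.' || c = '?'

-- the loop body AFTER the dont_break_quoted_blocks block fell through
def pvARest (found : Option Char) (dbqb inb esc : Bool) (acc : List Char) (c : Char) :
    Option Char × Bool × Bool × Bool × List Char :=
  if esc = false ∧ c = '\\' then (found, dbqb, inb, true, acc ++ [' ', c])
  else if esc then (found, dbqb, inb, false, acc ++ [c, ' '])
  else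
    let inb := if c = '[' then true else inb
    if inb then (found, dbqb, (if c = ']' then false else inb), false, acc ++ [' ', c, ' '])
    else
      match found with
      | none =>
          if pvSpecialA c then (found, dbqb, inb, false, acc ++ [' ', c, ' '])
          else (found, dbqb, inb, false, acc ++ [c])
      | some f => (some f, dbqb, inb, false, acc ++ [c])

def pvAStep (st : Option Char × Bool × Bool × Bool × List Char) (c : Char) :
    Option Char × Bool × Bool × Bool × List Char :=
  match st with
  | (found, dbqb, inb, esc, acc) =>
    if dbqb then
      match found with
      | some f => ((if c = f then none else some f), dbqb, inb, esc, acc ++ [c])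
      | none =>
          let found' : Option Char :=
            if c = '\'' then some '\'' else if c = '"' then some '"' else none
          match found' with
          | some f => (some f, dbqb, inb, esc, acc ++ [c])
          | none => pvARest none dbqb inb esc acc c
    else pvARest found dbqb inb esc acc c

def clean_pattern (pattern : String) : String :=
  let p := (PySem.Str.strip pattern).toList.map (fun c => if c.toNat < 128 then c else ' ')
  String.ofList (p.foldl pvAStep (none, false, false, false, [])).2.2.2.2

-- ===== PORT B =====
-- character tests of Source B, hoisted as helpers
def pvIsEsc (c : Char) : Bool := c = '\\'
def pvIsOpen (c : Char) : Bool := c = '['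
def pvIsClose (c : Char) : Bool := c = ']'

-- the while loop of Source B: the worklist is the list of remaining characters,
-- in_block is the flag; an escape consumes the escaped character in the same step
def pvBGo : Bool → List Char → List Char
  | _, [] => []
  | inb, c :: cs =>
    if pvIsEsc c then
      match cs with
      | [] => [' ', '\\']
      | e :: cs' => ' ' :: '\\' :: e :: ' ' :: pvBGo inb cs'
    else if inb then
      if pvIsClose c then ' ' :: c :: ' ' :: pvBGo false cs
      else ' ' :: c :: ' ' :: pvBGo true cs
    else if pvIsOpen c then ' ' :: c :: ' ' :: pvBGo true cs
    else if pvSpecialA c then ' ' :: c :: ' ' :: pvBGo false cs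
    else c :: pvBGo false cs

def clean_pattern_alt (pattern : String) : String :=
  let p := (PySem.Str.strip pattern).toList.map (fun c => if c.toNat < 128 then c else ' ')
  String.ofList (pvBGo false p)

-- ===== PRECONDITION & SPEC =====
def Spec_clean_pattern (pattern : String) (out : String) : Prop := out = clean_pattern_alt pattern
instance (pattern : String) (out : String) : Decidable (Spec_clean_pattern pattern out) := by unfold Spec_clean_pattern; infer_instance

-- ===== CLAIM (what is proved, stated in full; the proofs are below) =====
def Claim_equal_clean_pattern : Prop := ∀ (pattern : String), Dom_clean_pattern pattern → Spec_clean_pattern pattern (clean_pattern pattern)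

-- ===== LEMMAS AND PROOFS =====

lemma pvBGo_nil (inb : Bool) : pvBGo inb [] = [] := by cases inb <;> rw [pvBGo]

lemma pvBGo_cons (inb : Bool) (c : Char) (cs : List Char) :
    pvBGo inb (c :: cs) =
      (if pvIsEsc c then
        match cs with
        | [] => [' ', '\\']
        | e :: cs' => ' ' :: '\\' :: e :: ' ' :: pvBGo inb cs'
      else if inb then
        if pvIsClose c then ' ' :: c :: ' ' :: pvBGo false cs
        else ' ' :: c :: ' ' :: pvBGo true cs
      else if pvIsOpen c then ' ' :: c :: ' ' :: pvBGo true cs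
      else if pvSpecialA c then ' ' :: c :: ' ' :: pvBGo false cs
      else c :: pvBGo false cs) := by
  rw [pvBGo.eq_def]

-- loop invariant: A's fold from state (found = none, dbqb = false, in_block = inb,
-- escaped = false, new_pattern = acc) produces acc ++ pvBGo inb cs
lemma pvA_foldl : ∀ n (cs acc : List Char) (inb : Bool), cs.length ≤ n →
    (cs.foldl pvAStep (none, false, inb, false, acc)).2.2.2.2 = acc ++ pvBGo inb cs := by
  intro n
  induction n with
  | zero =>
    intro cs acc inb h
    have : cs = [] := List.eq_nil_of_length_eq_zero (by omega)
    subst this; simp [pvBGo_nil]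
  | succ n ih =>
    intro cs acc inb h
    match cs with
    | [] => simp [pvBGo_nil]
    | c :: cs' =>
      rw [List.foldl_cons, pvBGo_cons]
      by_cases hb : c = '\\'
      · subst hb
        match cs' with
        | [] =>
            cases inb <;>
              simp [pvAStep, pvARest, pvIsEsc, pvBGo_nil, List.foldl_cons]
        | d :: cs'' =>
            have h2 : cs''.length ≤ n := by simp at h; omega
            cases inb <;>
              simp [pvAStep, pvARest, pvIsEsc, List.foldl_cons,
                ih cs'' _ false h2, ih cs'' _ true h2]
      · have h1 : cs'.length ≤ n := by simp at h; omega
        cases inb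
        · by_cases hbr : c = '['
          · simp [pvAStep, pvARest, pvIsEsc, pvIsOpen, hb, hbr, ih cs' _ true h1]
          · by_cases hs : pvSpecialA c <;>
              simp [pvAStep, pvARest, pvIsEsc, pvIsOpen, hb, hbr, hs,
                ih cs' _ false h1]
        · by_cases hcl : c = ']'
          · simp [pvAStep, pvARest, pvIsEsc, pvIsClose, hb, hcl, ih cs' _ false h1]
          · simp [pvAStep, pvARest, pvIsEsc, pvIsClose, hb, hcl, ih cs' _ true h1]

-- ===== VERDICT (by name: the statement is the Claim_ definition above) =====
theorem clean_pattern_spec : Claim_equal_clean_pattern := by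
  intro pattern _
  unfold Spec_clean_pattern clean_pattern clean_pattern_alt
  set p := (PySem.Str.strip pattern).toList.map (fun c => if c.toNat < 128 then c else ' ') with hp
  simp [pvA_foldl p.length p [] false le_rfl]
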